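-- pv_equiv track=rewrite | github.com/dee021/CodingTest | 프로그래머스/unrated/181921. 배열 만들기 2/배열 만들기 2.py | solution
-- ===== SOURCE A (Python) =====
-- from itertools import product
--
-- def solution(l, r):
--     answer = set()
--     for i in range(len(str(l)), len(str(r))+1):
--         for nums in list(product('05', repeat=i)):
--             if l <= int(''.join(nums)) <= r:
--                 answer.add(int(''.join(nums)))
--     answer = sorted(answer)
--     return answer and answer or [-1]
-- ===== SOURCE B (Python) =====
-- def solution(l, r):
--     # Successor of v in the numbers written with digits 0/5 only (binary increment on digits /5).
--     def nxt(v):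
--         return v + 5 if v % 10 == 0 else 10 * nxt(v // 10)
--
--     answer = [0] if l <= 0 <= r else []
--     v = 5
--     while v <= r:
--         if v >= l:
--             answer.append(v)
--         v = nxt(v)
--     return answer if answer else [-1]
-- ===== Notes on version B (the rewrite author's own statement) =====
-- stated objective: simpler
-- what changed: Replaces the exhaustive itertools.product of '0'/'5' strings of every length from len(str(l)) to len(str(r)) (join, int, set, sort) by a direct in-order enumeration of the 0/5-digit numbers themselves via a successor function (binary increment on the digits, 0 prepended when l <= 0 <= r), so the answer list is built already sorted and deduplicated.
-- intended difference: When l < 0 <= r and str(l) is longer than str(r) (e.g. l=-1, r=0), A's digit-length range is empty so it returns [-1] even though valid numbers such as 0 lie in [l,r]; B returns those numbers ([0] at the witness), which is the intended output. — e.g. on solution(-1, 0): A returns [-1], B returns [0]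
import Mathlib
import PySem

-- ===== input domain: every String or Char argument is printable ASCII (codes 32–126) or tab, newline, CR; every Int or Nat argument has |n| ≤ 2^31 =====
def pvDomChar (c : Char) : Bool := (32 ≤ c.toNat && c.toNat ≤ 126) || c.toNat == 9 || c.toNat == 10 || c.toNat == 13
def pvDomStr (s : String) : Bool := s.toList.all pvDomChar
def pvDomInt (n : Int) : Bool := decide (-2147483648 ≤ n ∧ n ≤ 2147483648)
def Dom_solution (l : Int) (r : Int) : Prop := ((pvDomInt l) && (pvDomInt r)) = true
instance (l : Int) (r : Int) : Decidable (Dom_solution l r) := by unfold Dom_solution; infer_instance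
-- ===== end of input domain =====

-- B enumerates the 0/5-digit numbers in increasing order via a digit-successor function instead of
-- A's product of '0'/'5' strings of every length; on l < 0 <= r with len(str(l)) > len(str(r)) A
-- returns [-1] although valid numbers lie in [l,r] — B returns them (intended difference, see D_).


-- ===== PORT A =====
-- list(product('05', repeat=i)): all length-i tuples over '0','5', first component varying slowest
def prodRep05 : Nat → List (List Char)
  | 0 => [[]]
  | n+1 => (['0', '5']).flatMap (fun c => (prodRep05 n).map (fun s => c :: s))

-- int(''.join(nums)): hand-ported decimal digit fold, exact on nonempty ASCII-digit strings —
-- the only strings it receives here (every nums is a nonempty tuple over '0','5')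
def joinInt (cs : List Char) : Int := cs.foldl (fun a c => 10 * a + ((c.toNat : Int) - 48)) 0

def solution (l : Int) (r : Int) : List Int :=
  let answer : PySem.Set Int :=
    (PySem.List.pyRange ((PySem.Int.toChars l).length : Int) (((PySem.Int.toChars r).length : Int) + 1) 1).foldl
      (fun ans i =>
        (prodRep05 i.toNat).foldl
          (fun ans nums =>
            if l ≤ joinInt nums ∧ joinInt nums ≤ r then PySem.Set.add ans (joinInt nums) else ans)
          ans)
      PySem.Set.empty
  let answer := PySem.List.sorted answer (fun x => x) false
  if answer.isEmpty then [-1] else answer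

-- ===== PORT B =====
-- nxt(v): successor of v among the numbers written with digits 0/5 only.
-- (structural recursion with a fuel guard, fuel v ≥ recursion depth; nxt05_eq below is
-- exactly B's recursive equation)
def nxt05Fuel : Nat → Nat → Nat
  | 0, v => v + 5
  | f+1, v => if v % 10 = 0 then v + 5 else 10 * nxt05Fuel f (v / 10)

def nxt05 (v : Nat) : Nat := nxt05Fuel v v

-- the while loop of B (fuel = remaining distance to r, enough since nxt05 increases;
-- go05_eq below is exactly the loop equation)
def go05Fuel (l r : Int) : Nat → Nat → List Int → List Int
  | 0, _, acc => acc
  | f+1, v, acc =>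
    if (v : Int) ≤ r then
      go05Fuel l r f (nxt05 v) (if l ≤ (v : Int) then acc ++ [(v : Int)] else acc)
    else acc

def go05 (l r : Int) (v : Nat) (acc : List Int) : List Int :=
  go05Fuel l r (r.toNat + 1 - v) v acc

def solution_alt (l : Int) (r : Int) : List Int :=
  let answer : List Int := if l ≤ 0 ∧ 0 ≤ r then [0] else []
  let answer := go05 l r 5 answer
  if answer.isEmpty then [-1] else answer

-- ===== PRECONDITION & SPEC =====
-- When l < 0 ≤ r and str(l) is longer than str(r) (e.g. l=-1, r=0), A's digit-length range is empty
-- so it returns [-1] even though valid numbers such as 0 lie in [l,r]; B returns those numbers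
-- ([0] at the witness), which is the intended output.
def D_solution (l : Int) (r : Int) : Prop :=
  l < 0 ∧ 0 ≤ r ∧ ∃ d : Nat, d < 11 ∧ (10:Int) ^ d ≤ -l ∧ r < (10:Int) ^ (d + 1)
instance (l : Int) (r : Int) : Decidable (D_solution l r) := by
  unfold D_solution
  have : Decidable (∃ d : Nat, d < 11 ∧ (10:Int) ^ d ≤ -l ∧ r < (10:Int) ^ (d + 1)) :=
    decidable_of_iff (∃ d ∈ List.range 11, (10:Int) ^ d ≤ -l ∧ r < (10:Int) ^ (d + 1))
      (by simp [List.mem_range])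
  infer_instance

def Spec_solution (l : Int) (r : Int) (out : List Int) : Prop := ¬ D_solution l r → out = solution_alt l r
instance (l : Int) (r : Int) (out : List Int) : Decidable (Spec_solution l r out) := by unfold Spec_solution; infer_instance

def pvDiffWitness_solution : Int × Int := (-1, 0)
def pvDiffWitnessOut_solution : (List Int) × (List Int) := ([-1], [0])

-- ===== CLAIM (what is proved, stated in full; the proofs are below) =====
def Claim_unchanged_solution : Prop := ∀ (l : Int) (r : Int), Dom_solution l r → Spec_solution l r (solution l r)
def Claim_changed_solution : Prop := Dom_solution (pvDiffWitness_solution.1) (pvDiffWitness_solution.2) ∧ D_solution (pvDiffWitness_solution.1) (pvDiffWitness_solution.2) ∧ solution (pvDiffWitness_solution.1) (pvDiffWitness_solution.2) = pvDiffWitnessOut_solution.1 ∧ solution_alt (pvDiffWitness_solution.1) (pvDiffWitness_solution.2) = pvDiffWitnessOut_solution.2 ∧ pvDiffWitnessOut_solution.1 ≠ pvDiffWitnessOut_solution.2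
def Claim_exact_solution : Prop := ∀ (l : Int) (r : Int), Dom_solution l r → D_solution l r → solution l r ≠ solution_alt l r

-- ===== LEMMAS AND PROOFS =====

-- fuel irrelevance and the recursive equations of B's two functions
theorem nxt05Fuel_congr : ∀ (f1 f2 v : Nat), v ≤ f1 → v ≤ f2 → nxt05Fuel f1 v = nxt05Fuel f2 v := by
  intro f1
  induction f1 with
  | zero =>
    intro f2 v h1 h2
    have hv : v = 0 := by omega
    subst hv
    cases f2 <;> simp [nxt05Fuel]
  | succ f ih =>
    intro f2 v h1 h2
    cases f2 with
    | zero =>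
      have hv : v = 0 := by omega
      subst hv
      simp [nxt05Fuel]
    | succ f2' =>
      simp only [nxt05Fuel]
      by_cases hm : v % 10 = 0
      · rw [if_pos hm, if_pos hm]
      · rw [if_neg hm, if_neg hm]
        have hd : v / 10 < v := Nat.div_lt_self (by omega) (by norm_num)
        rw [ih f2' (v / 10) (by omega) (by omega)]

theorem nxt05_eq (v : Nat) : nxt05 v = if v % 10 = 0 then v + 5 else 10 * nxt05 (v / 10) := by
  cases v with
  | zero => simp [nxt05, nxt05Fuel]
  | succ n =>
    show nxt05Fuel (n + 1) (n + 1) = _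
    simp only [nxt05Fuel]
    by_cases hm : (n + 1) % 10 = 0
    · rw [if_pos hm, if_pos hm]
    · rw [if_neg hm, if_neg hm]
      have hd : (n + 1) / 10 < n + 1 := Nat.div_lt_self (by omega) (by norm_num)
      rw [nxt05Fuel_congr n ((n + 1) / 10) ((n + 1) / 10) (by omega) (le_refl _)]
      rfl

theorem nxt05_gt (v : Nat) : v < nxt05 v := by
  induction v using Nat.strong_induction_on with
  | _ v ih =>
    rw [nxt05_eq]
    split
    · omega
    · rename_i h
      have hv : 0 < v := by omega
      have := ih (v / 10) (Nat.div_lt_self hv (by norm_num))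
      have h2 : v % 10 < 10 := Nat.mod_lt _ (by norm_num)
      have h3 := Nat.div_add_mod v 10
      omega

theorem go05Fuel_congr (l r : Int) : ∀ (f1 f2 v : Nat) (acc : List Int),
    r.toNat + 1 - v ≤ f1 → r.toNat + 1 - v ≤ f2 →
    go05Fuel l r f1 v acc = go05Fuel l r f2 v acc := by
  intro f1
  induction f1 with
  | zero =>
    intro f2 v acc h1 h2
    have hv : ¬ ((v : Int) ≤ r) := by omega
    cases f2 with
    | zero => rfl
    | succ f2' =>
      simp only [go05Fuel]
      rw [if_neg hv]
  | succ f ih =>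
    intro f2 v acc h1 h2
    by_cases hv : (v : Int) ≤ r
    · have hge : 1 ≤ r.toNat + 1 - v := by omega
      cases f2 with
      | zero => omega
      | succ f2' =>
        simp only [go05Fuel]
        rw [if_pos hv, if_pos hv]
        exact ih f2' (nxt05 v) _ (by have := nxt05_gt v; omega) (by have := nxt05_gt v; omega)
    · cases f2 with
      | zero =>
        simp only [go05Fuel]
        rw [if_neg hv]
      | succ f2' =>
        simp only [go05Fuel]
        rw [if_neg hv, if_neg hv]

theorem go05_eq (l r : Int) (v : Nat) (acc : List Int) :
    go05 l r v acc =
      if (v : Int) ≤ r then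
        go05 l r (nxt05 v) (if l ≤ (v : Int) then acc ++ [(v : Int)] else acc)
      else acc := by
  unfold go05
  by_cases hv : (v : Int) ≤ r
  · rw [if_pos hv]
    have h1 : r.toNat + 1 - v = (r.toNat - v) + 1 := by omega
    rw [h1]
    simp only [go05Fuel]
    rw [if_pos hv]
    exact go05Fuel_congr l r _ _ (nxt05 v) _ (by have := nxt05_gt v; omega)
      (by have := nxt05_gt v; omega)
  · rw [if_neg hv]
    rcases hf : (r.toNat + 1 - v) with _ | f
    · rfl
    · simp only [go05Fuel]
      rw [if_neg hv]


-- φ k: the k-th number written with digits 0/5 only (the binary digits of k read as 0/5 decimals)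
def phi05 (k : Nat) : Nat :=
  if h : k = 0 then 0 else 10 * phi05 (k / 2) + 5 * (k % 2)
decreasing_by exact Nat.div_lt_self (by omega) (by norm_num)

theorem phi05_zero : phi05 0 = 0 := by rw [phi05]; simp

theorem phi05_rec (k : Nat) : phi05 k = 10 * phi05 (k / 2) + 5 * (k % 2) := by
  by_cases h : k = 0
  · subst h; rw [phi05]; simp
  · rw [phi05]; simp [h]

theorem phi05_one : phi05 1 = 5 := by rw [phi05_rec]; simp [phi05_zero]

-- decimal digit count of a natural number
def dlen (n : Nat) : Nat :=
  if h : n < 10 then 1 else dlen (n / 10) + 1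
decreasing_by exact Nat.div_lt_self (by omega) (by norm_num)

theorem dlen_pos (n : Nat) : 1 ≤ dlen n := by
  rw [dlen]; split <;> omega

theorem phi05_strictMono : ∀ {k j : Nat}, k < j → phi05 k < phi05 j := by
  intro k j
  induction j using Nat.strong_induction_on generalizing k with
  | _ j ih =>
    intro hkj
    rw [phi05_rec k, phi05_rec j]
    have hj : j ≠ 0 := by omega
    rcases Nat.lt_or_ge (k / 2) (j / 2) with h | h
    · have := ih (j / 2) (Nat.div_lt_self (by omega) (by norm_num)) h
      have hk2 : k % 2 < 2 := Nat.mod_lt _ (by norm_num)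
      have hj2 : j % 2 < 2 := Nat.mod_lt _ (by norm_num)
      omega
    · have heq : k / 2 = j / 2 := by omega
      rw [heq]
      have h3 := Nat.div_add_mod k 2
      have h4 := Nat.div_add_mod j 2
      omega

theorem phi05_add_pow : ∀ (i k : Nat), k < 2 ^ i → phi05 (k + 2 ^ i) = phi05 k + 5 * 10 ^ i := by
  intro i
  induction i with
  | zero => intro k hk; interval_cases k; simp [phi05_rec 1, phi05_zero]
  | succ i ih =>
    intro k hk
    rw [phi05_rec (k + 2 ^ (i+1)), phi05_rec k]
    have h1 : (k + 2 ^ (i+1)) / 2 = k / 2 + 2 ^ i := by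
      have : 2 ^ (i+1) = 2 * 2 ^ i := by ring
      omega
    have h2 : (k + 2 ^ (i+1)) % 2 = k % 2 := by
      have : 2 ^ (i+1) = 2 * 2 ^ i := by ring
      omega
    have h3 : k / 2 < 2 ^ i := by
      have : 2 ^ (i+1) = 2 * 2 ^ i := by ring
      omega
    rw [h1, h2, ih _ h3]
    ring

theorem phi05_mono {k j : Nat} (h : k ≤ j) : phi05 k ≤ phi05 j := by
  rcases Nat.lt_or_ge k j with h' | h'
  · exact Nat.le_of_lt (phi05_strictMono h')
  · have he : k = j := by omega
    subst he; exact Nat.le_refl _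

theorem phi05_pow_le {i k : Nat} (h : 2 ^ i ≤ k) : 10 ^ i ≤ phi05 k := by
  have h1 : phi05 (2 ^ i) = 5 * 10 ^ i := by
    have := phi05_add_pow i 0 (by positivity)
    simpa [phi05_zero] using this
  have := phi05_mono h
  have h10 : 0 < 10 ^ i := by positivity
  omega

theorem phi05_succ : ∀ (k : Nat), nxt05 (phi05 k) = phi05 (k + 1) := by
  intro k
  induction k using Nat.strong_induction_on with
  | _ k ih =>
    by_cases h0 : k = 0
    · subst h0
      rw [phi05_zero, nxt05_eq, phi05_rec 1]
      simp [phi05_zero]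
    · by_cases hm : k % 2 = 0
      · -- k even: phi05 k = 10 * phi05 (k/2), last digit 0
        have hk : phi05 k = 10 * phi05 (k / 2) := by rw [phi05_rec k, hm]; ring
        have hmod : phi05 k % 10 = 0 := by omega
        rw [nxt05_eq]
        rw [if_pos hmod]
        -- phi05 k + 5 = phi05 (k+1); (k+1) odd, (k+1)/2 = k/2
        rw [phi05_rec (k + 1)]
        have h1 : (k + 1) / 2 = k / 2 := by omega
        have h2 : (k + 1) % 2 = 1 := by omega
        rw [h1, h2]
        omega
      · -- k odd: phi05 k = 10 * phi05 (k/2) + 5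
        have hk : phi05 k = 10 * phi05 (k / 2) + 5 := by
          rw [phi05_rec k]
          have : k % 2 = 1 := by omega
          rw [this]
        have hmod : phi05 k % 10 = 5 := by omega
        rw [nxt05_eq]
        have hne : ¬ (phi05 k % 10 = 0) := by omega
        rw [if_neg hne]
        have hdiv : phi05 k / 10 = phi05 (k / 2) := by omega
        rw [hdiv, ih (k / 2) (Nat.div_lt_self (by omega) (by norm_num))]
        -- goal: 10 * phi05 (k/2 + 1) = phi05 (k + 1), k odd so k+1 = 2*(k/2+1)
        rw [phi05_rec (k + 1)]
        have h1 : (k + 1) / 2 = k / 2 + 1 := by omega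
        have h2 : (k + 1) % 2 = 0 := by omega
        rw [h1, h2]
        ring

theorem lt_pow_dlen : ∀ (n : Nat), n < 10 ^ dlen n := by
  intro n
  induction n using Nat.strong_induction_on with
  | _ n ih =>
    rw [dlen]
    split
    · rename_i h; simpa using h
    · rename_i h
      have := ih (n / 10) (Nat.div_lt_self (by omega) (by norm_num))
      have h2 := Nat.div_add_mod n 10
      have h3 : n % 10 < 10 := Nat.mod_lt _ (by norm_num)
      rw [pow_succ]
      omega

theorem dlen_mono : ∀ {m n : Nat}, m ≤ n → dlen m ≤ dlen n := by
  intro m n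
  induction n using Nat.strong_induction_on generalizing m with
  | _ n ih =>
    intro h
    by_cases hm : m < 10
    · have hm1 : dlen m = 1 := by rw [dlen]; rw [dif_pos hm]
      have := dlen_pos n
      omega
    · have hn : ¬ n < 10 := by omega
      have hm2 : dlen m = dlen (m / 10) + 1 := by rw [dlen]; rw [dif_neg hm]
      have hn2 : dlen n = dlen (n / 10) + 1 := by rw [dlen]; rw [dif_neg hn]
      have := ih (n / 10) (Nat.div_lt_self (by omega) (by norm_num)) (Nat.div_le_div_right h)
      omega

theorem toDigitsCore_length : ∀ (f n : Nat) (ds : List Char), n < f →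
    (Nat.toDigitsCore 10 f n ds).length = dlen n + ds.length := by
  intro f
  induction f with
  | zero => intro n ds h; omega
  | succ f ih =>
    intro n ds h
    rw [Nat.toDigitsCore]
    by_cases h10 : n / 10 = 0
    · rw [if_pos h10]
      rw [dlen]
      rw [dif_pos (by omega : n < 10)]
      simp
      omega
    · rw [if_neg h10]
      have hn10 : ¬ n < 10 := by omega
      have hlt : n / 10 < f := by
        have : n / 10 < n := Nat.div_lt_self (by omega) (by norm_num)
        omega
      rw [ih (n / 10) _ hlt]
      conv_rhs => rw [dlen]
      rw [dif_neg hn10]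
      simp
      omega

theorem toChars_length_of_nonneg {n : Int} (h : 0 ≤ n) :
    (PySem.Int.toChars n).length = dlen n.toNat := by
  unfold PySem.Int.toChars
  rw [if_neg (by omega : ¬ n < 0)]
  unfold Nat.toDigits
  rw [toDigitsCore_length _ _ _ (Nat.lt_succ_self _)]
  simp

theorem c0val : (('0'.toNat : Int) - 48) = 0 := by decide
theorem c5val : (('5'.toNat : Int) - 48) = 5 := by decide

theorem length_of_mem_prodRep05 : ∀ {i : Nat} {s : List Char}, s ∈ prodRep05 i → s.length = i := by
  intro i
  induction i with
  | zero => intro s hs; simp [prodRep05] at hs; simp [hs]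
  | succ i ih =>
    intro s hs
    simp [prodRep05] at hs
    rcases hs with ⟨t, ht, rfl⟩ | ⟨t, ht, rfl⟩ <;> simp [ih ht]

theorem joinInt_fold_shift : ∀ (t : List Char) (a : Int),
    t.foldl (fun a c => 10 * a + ((c.toNat : Int) - 48)) a
      = a * 10 ^ t.length + joinInt t := by
  intro t
  induction t with
  | nil => intro a; simp [joinInt]
  | cons c t ih =>
    intro a
    have h1 : joinInt (c :: t)
        = List.foldl (fun a c => 10 * a + ((c.toNat : Int) - 48)) (10 * 0 + ((c.toNat : Int) - 48)) t := rfl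
    simp only [List.foldl_cons, List.length_cons]
    rw [ih, h1, ih]
    ring

theorem joinInt_cons (c : Char) (t : List Char) :
    joinInt (c :: t) = ((c.toNat : Int) - 48) * 10 ^ t.length + joinInt t := by
  have h1 : joinInt (c :: t)
      = List.foldl (fun a c => 10 * a + ((c.toNat : Int) - 48)) (10 * 0 + ((c.toNat : Int) - 48)) t := rfl
  rw [h1, joinInt_fold_shift]
  ring

theorem valset_prodRep05 : ∀ (i : Nat) (v : Int),
    (∃ s ∈ prodRep05 i, joinInt s = v) ↔ ∃ k < 2 ^ i, ((phi05 k : Nat) : Int) = v := by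
  intro i
  induction i with
  | zero =>
    intro v
    constructor
    · rintro ⟨s, hs, rfl⟩
      simp [prodRep05] at hs
      subst hs
      exact ⟨0, by norm_num, by simp [phi05_zero, joinInt]⟩
    · rintro ⟨k, hk, rfl⟩
      interval_cases k
      exact ⟨[], by simp [prodRep05], by simp [joinInt, phi05_zero]⟩
  | succ i ih =>
    have h2 : 2 ^ (i+1) = 2 * 2 ^ i := by ring
    intro v
    constructor
    · rintro ⟨s, hs, rfl⟩
      simp [prodRep05] at hs
      rcases hs with ⟨t, ht, rfl⟩ | ⟨t, ht, rfl⟩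
      · have hlen := length_of_mem_prodRep05 ht
        have hv : joinInt ('0' :: t) = joinInt t := by
          rw [joinInt_cons, c0val]; ring
        rcases (ih (joinInt t)).mp ⟨t, ht, rfl⟩ with ⟨k, hk, hphi⟩
        exact ⟨k, by omega, by rw [hv]; exact hphi⟩
      · have hlen := length_of_mem_prodRep05 ht
        have hv : joinInt ('5' :: t) = 5 * 10 ^ i + joinInt t := by
          rw [joinInt_cons, c5val, hlen]
        rcases (ih (joinInt t)).mp ⟨t, ht, rfl⟩ with ⟨k, hk, hphi⟩
        refine ⟨k + 2 ^ i, by omega, ?_⟩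
        rw [phi05_add_pow i k hk, hv, ← hphi]
        push_cast
        ring
    · rintro ⟨k, hk, rfl⟩
      by_cases hki : k < 2 ^ i
      · rcases (ih ((phi05 k : Nat) : Int)).mpr ⟨k, hki, rfl⟩ with ⟨t, ht, hval⟩
        refine ⟨'0' :: t, ?_, ?_⟩
        · simpa [prodRep05] using ht
        · rw [joinInt_cons, c0val, hval]; ring
      · have hk'lt : k - 2 ^ i < 2 ^ i := by omega
        have hkk : k = (k - 2 ^ i) + 2 ^ i := by omega
        rcases (ih ((phi05 (k - 2 ^ i) : Nat) : Int)).mpr ⟨k - 2 ^ i, hk'lt, rfl⟩ with ⟨t, ht, hval⟩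
        refine ⟨'5' :: t, ?_, ?_⟩
        · simpa [prodRep05] using ht
        · have hlen := length_of_mem_prodRep05 ht
          conv_rhs => rw [hkk]
          rw [joinInt_cons, c5val, hlen, hval, phi05_add_pow i _ hk'lt]
          push_cast
          ring

theorem mem_inner_foldl (l r : Int) : ∀ (ss : List (List Char)) (ac : PySem.Set Int) (x : Int),
    (x ∈ ss.foldl (fun ans nums =>
        if l ≤ joinInt nums ∧ joinInt nums ≤ r then PySem.Set.add ans (joinInt nums) else ans) ac)
      ↔ x ∈ ac ∨ ∃ s ∈ ss, (l ≤ joinInt s ∧ joinInt s ≤ r) ∧ joinInt s = x := by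
  intro ss
  induction ss with
  | nil => intro ac x; simp
  | cons s ss ih =>
    intro ac x
    simp only [List.foldl_cons]
    rw [ih]
    by_cases hc : l ≤ joinInt s ∧ joinInt s ≤ r
    · rw [if_pos hc]
      rw [PySem.Set.mem_add]
      constructor
      · rintro (( h | h) | h)
        · exact Or.inl h
        · exact Or.inr ⟨s, by simp, hc, h.symm⟩
        · rcases h with ⟨t, ht, h1, h2⟩; exact Or.inr ⟨t, by simp [ht], h1, h2⟩
      · rintro (h | ⟨t, ht, h1, h2⟩)
        · exact Or.inl (Or.inl h)
        · rcases List.mem_cons.mp ht with rfl | ht'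
          · exact Or.inl (Or.inr h2.symm)
          · exact Or.inr ⟨t, ht', h1, h2⟩
    · rw [if_neg hc]
      constructor
      · rintro (h | ⟨t, ht, h1, h2⟩)
        · exact Or.inl h
        · exact Or.inr ⟨t, by simp [ht], h1, h2⟩
      · rintro (h | ⟨t, ht, h1, h2⟩)
        · exact Or.inl h
        · rcases List.mem_cons.mp ht with rfl | ht'
          · exact absurd h1 hc
          · exact Or.inr ⟨t, ht', h1, h2⟩

theorem nodup_inner_foldl (l r : Int) : ∀ (ss : List (List Char)) (ac : PySem.Set Int),
    ac.Nodup →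
    (ss.foldl (fun ans nums =>
        if l ≤ joinInt nums ∧ joinInt nums ≤ r then PySem.Set.add ans (joinInt nums) else ans) ac).Nodup := by
  intro ss
  induction ss with
  | nil => intro ac h; simpa using h
  | cons s ss ih =>
    intro ac h
    simp only [List.foldl_cons]
    apply ih
    split
    · exact PySem.Set.nodup_add _ _ h
    · exact h

theorem mem_outer_foldl (l r : Int) : ∀ (is : List Int) (ac : PySem.Set Int) (x : Int),
    (x ∈ is.foldl (fun ans i =>
        (prodRep05 i.toNat).foldl (fun ans nums =>
          if l ≤ joinInt nums ∧ joinInt nums ≤ r then PySem.Set.add ans (joinInt nums) else ans) ans) ac)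
      ↔ x ∈ ac ∨ ∃ i ∈ is, ∃ s ∈ prodRep05 i.toNat, (l ≤ joinInt s ∧ joinInt s ≤ r) ∧ joinInt s = x := by
  intro is
  induction is with
  | nil => intro ac x; simp
  | cons i is ih =>
    intro ac x
    simp only [List.foldl_cons]
    rw [ih, mem_inner_foldl]
    constructor
    · rintro ((h | ⟨s, hs, h1, h2⟩) | ⟨j, hj, hrest⟩)
      · exact Or.inl h
      · exact Or.inr ⟨i, by simp, s, hs, h1, h2⟩
      · exact Or.inr ⟨j, by simp [hj], hrest⟩
    · rintro (h | ⟨j, hj, hrest⟩)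
      · exact Or.inl (Or.inl h)
      · rcases List.mem_cons.mp hj with rfl | hj'
        · exact Or.inl (Or.inr hrest)
        · exact Or.inr ⟨j, hj', hrest⟩

theorem nodup_outer_foldl (l r : Int) : ∀ (is : List Int) (ac : PySem.Set Int),
    ac.Nodup →
    (is.foldl (fun ans i =>
        (prodRep05 i.toNat).foldl (fun ans nums =>
          if l ≤ joinInt nums ∧ joinInt nums ≤ r then PySem.Set.add ans (joinInt nums) else ans) ans) ac).Nodup := by
  intro is
  induction is with
  | nil => intro ac h; simpa using h
  | cons i is ih =>
    intro ac h
    simp only [List.foldl_cons]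
    exact ih _ (nodup_inner_foldl l r _ _ h)

theorem go05_append (l r : Int) : ∀ (v : Nat) (acc : List Int),
    go05 l r v acc = acc ++ go05 l r v [] := by
  intro v
  induction hm : r.toNat + 1 - v using Nat.strong_induction_on generalizing v with
  | _ m ih =>
    subst hm
    intro acc
    conv_lhs => rw [go05_eq]
    conv_rhs => rw [go05_eq]
    by_cases h : (v : Int) ≤ r
    · rw [if_pos h, if_pos h]
      have hd : r.toNat + 1 - nxt05 v < r.toNat + 1 - v := by
        have := nxt05_gt v
        omega
      rw [ih _ hd (nxt05 v) rfl, ih _ hd (nxt05 v) rfl (if l ≤ (v : Int) then [] ++ [(v : Int)] else [])]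
      by_cases hl : l ≤ (v : Int)
      · simp [hl]
      · simp [hl]
    · rw [if_neg h, if_neg h]
      simp

theorem mem_go05 (l r : Int) : ∀ (k : Nat) (x : Int),
    (x ∈ go05 l r (phi05 k) []) ↔
      ∃ j : Nat, k ≤ j ∧ l ≤ (phi05 j : Int) ∧ ((phi05 j : Nat) : Int) ≤ r ∧ x = (phi05 j : Int) := by
  intro k
  induction hm : r.toNat + 1 - phi05 k using Nat.strong_induction_on generalizing k with
  | _ m ih =>
    subst hm
    intro x
    rw [go05_eq]
    by_cases h : ((phi05 k : Nat) : Int) ≤ r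
    · rw [if_pos h]
      rw [phi05_succ k]
      have hd : r.toNat + 1 - phi05 (k + 1) < r.toNat + 1 - phi05 k := by
        have h1 := nxt05_gt (phi05 k)
        rw [phi05_succ k] at h1
        omega
      rw [go05_append]
      constructor
      · intro hx
        rcases List.mem_append.mp hx with hx1 | hx2
        · by_cases hl : l ≤ (phi05 k : Int)
          · simp [hl] at hx1
            exact ⟨k, le_refl _, hl, h, hx1⟩
          · simp [hl] at hx1
        · rcases (ih _ hd (k+1) rfl x).mp hx2 with ⟨j, hj, h1, h2, h3⟩
          exact ⟨j, by omega, h1, h2, h3⟩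
      · rintro ⟨j, hjk, h1, h2, rfl⟩
        by_cases hjeq : j = k
        · subst hjeq
          apply List.mem_append.mpr
          left
          simp [h1]
        · apply List.mem_append.mpr
          right
          exact (ih _ hd (k+1) rfl _).mpr ⟨j, by omega, h1, h2, rfl⟩
    · rw [if_neg h]
      simp only [List.not_mem_nil, false_iff]
      rintro ⟨j, hjk, h1, h2, rfl⟩
      apply h
      calc ((phi05 k : Nat) : Int) ≤ (phi05 j : Int) := by exact_mod_cast phi05_mono hjk
        _ ≤ r := h2

theorem pairwise_go05 (l r : Int) : ∀ (k : Nat),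
    (go05 l r (phi05 k) []).Pairwise (· < ·) := by
  intro k
  induction hm : r.toNat + 1 - phi05 k using Nat.strong_induction_on generalizing k with
  | _ m ih =>
    subst hm
    rw [go05_eq]
    by_cases h : ((phi05 k : Nat) : Int) ≤ r
    · rw [if_pos h, phi05_succ k]
      have hd : r.toNat + 1 - phi05 (k + 1) < r.toNat + 1 - phi05 k := by
        have h1 := nxt05_gt (phi05 k)
        rw [phi05_succ k] at h1
        omega
      rw [go05_append]
      apply List.pairwise_append.mpr
      refine ⟨?_, ih _ hd (k+1) rfl, ?_⟩
      · by_cases hl : l ≤ (phi05 k : Int) <;> simp [hl]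
      · intro a ha b hb
        rcases (mem_go05 l r (k+1) b).mp hb with ⟨j, hj, _, _, rfl⟩
        have hak : a = ((phi05 k : Nat) : Int) := by
          by_cases hl : l ≤ (phi05 k : Int) <;> simp [hl] at ha
          exact ha
        subst hak
        exact_mod_cast phi05_strictMono (by omega : k < j)
    · rw [if_neg h]
      exact List.Pairwise.nil

theorem pow_dlen_le : ∀ (n : Nat), 1 ≤ n → 10 ^ (dlen n - 1) ≤ n := by
  intro n
  induction n using Nat.strong_induction_on with
  | _ n ih =>
    intro h1
    by_cases h10 : n < 10
    · have : dlen n = 1 := by rw [dlen]; rw [dif_pos h10]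
      simp [this]
      omega
    · have hd : dlen n = dlen (n / 10) + 1 := by rw [dlen]; rw [dif_neg h10]
      have hrec := ih (n / 10) (Nat.div_lt_self (by omega) (by norm_num)) (by omega)
      have hp := dlen_pos (n / 10)
      have : 10 ^ (dlen n - 1) = 10 ^ (dlen (n / 10) - 1) * 10 := by
        rw [hd]
        rw [show dlen (n / 10) + 1 - 1 = (dlen (n / 10) - 1) + 1 by omega]
        ring
      rw [this]
      have := Nat.div_add_mod n 10
      have : n % 10 < 10 := Nat.mod_lt _ (by norm_num)
      omega

theorem dlen_le_of_lt_pow {n m : Nat} (hm : 1 ≤ m) (h : n < 10 ^ m) : dlen n ≤ m := by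
  by_cases h0 : n = 0
  · subst h0
    have : dlen 0 = 1 := by rw [dlen]; rw [dif_pos (by norm_num)]
    omega
  · by_contra hgt
    have h1 : m ≤ dlen n - 1 := by omega
    have h2 : (10:Nat) ^ m ≤ 10 ^ (dlen n - 1) := Nat.pow_le_pow_right (by norm_num) h1
    have h3 := pow_dlen_le n (by omega)
    omega

theorem toChars_length_neg {n : Int} (h : n < 0) :
    (PySem.Int.toChars n).length = dlen n.natAbs + 1 := by
  unfold PySem.Int.toChars
  rw [if_pos h]
  simp only [List.length_cons]
  unfold Nat.toDigits
  rw [toDigitsCore_length _ _ _ (Nat.lt_succ_self _)]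
  simp

-- a ≤ b for the digit-length range whenever some valid v with l ≤ v ≤ r exists (outside D_)
theorem digits_le (l r : Int) (hdom : Dom_solution l r) (hND : ¬ D_solution l r)
    (v : Int) (h0 : 0 ≤ v) (hl : l ≤ v) (hr : v ≤ r) :
    (PySem.Int.toChars l).length ≤ (PySem.Int.toChars r).length := by
  have hr0 : 0 ≤ r := le_trans h0 hr
  by_cases hl0 : l < 0
  · by_contra hba
    apply hND
    refine ⟨hl0, hr0, dlen l.natAbs - 1, ?_, ?_, ?_⟩
    · -- within Dom, |l| ≤ 2^31 < 10^10
      have hla : l.natAbs ≤ 2 ^ 31 := by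
        have : pvDomInt l = true := by
          unfold Dom_solution at hdom
          simp [Bool.and_eq_true] at hdom
          exact hdom.1
        unfold pvDomInt at this
        simp at this
        omega
      by_contra hge
      have h1 : (10:Nat) ^ 10 ≤ 10 ^ (dlen l.natAbs - 1) :=
        Nat.pow_le_pow_right (by norm_num) (by omega)
      have h2 := pow_dlen_le l.natAbs (by omega)
      have : (10:Nat) ^ 10 = 10000000000 := by norm_num
      omega
    · have h2 := pow_dlen_le l.natAbs (by omega)
      have : ((10:Nat) ^ (dlen l.natAbs - 1) : Int) = (10:Int) ^ (dlen l.natAbs - 1) := by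
        push_cast
        ring
      omega
    · -- r < 10 ^ (dlen l.natAbs): from ¬(len l ≤ len r)
      have hlen : (PySem.Int.toChars r).length < (PySem.Int.toChars l).length := by omega
      rw [toChars_length_neg hl0, toChars_length_of_nonneg hr0] at hlen
      have hd : dlen r.toNat ≤ dlen l.natAbs := by omega
      have h1 : r.toNat < 10 ^ dlen r.toNat := lt_pow_dlen r.toNat
      have h2 : (10:Nat) ^ dlen r.toNat ≤ 10 ^ dlen l.natAbs := Nat.pow_le_pow_right (by norm_num) hd
      have h3 : dlen l.natAbs - 1 + 1 = dlen l.natAbs := by have := dlen_pos l.natAbs; omega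
      rw [h3]
      have : ((10:Nat) ^ dlen l.natAbs : Int) = (10:Int) ^ dlen l.natAbs := by push_cast; ring
      omega
  · have hl0' : 0 ≤ l := by omega
    rw [toChars_length_of_nonneg hl0', toChars_length_of_nonneg hr0]
    exact dlen_mono (by omega)

-- a valid number φk in [l,r] is produced by A's double loop (at string length len(str(r)))
theorem build_mem (l r : Int) (hdom : Dom_solution l r) (hND : ¬ D_solution l r) (k : Nat)
    (hl : l ≤ ((phi05 k : Nat) : Int)) (hr : ((phi05 k : Nat) : Int) ≤ r) :
    ∃ i ∈ PySem.List.pyRange ((PySem.Int.toChars l).length : Int) (((PySem.Int.toChars r).length : Int) + 1) 1,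
      ∃ s ∈ prodRep05 i.toNat, (l ≤ joinInt s ∧ joinInt s ≤ r) ∧ joinInt s = ((phi05 k : Nat) : Int) := by
  have hr0 : 0 ≤ r := le_trans (by positivity) hr
  have hab := digits_le l r hdom hND _ (by positivity) hl hr
  have hb := toChars_length_of_nonneg hr0
  have hklt : k < 2 ^ (PySem.Int.toChars r).length := by
    by_contra hge
    have h1 : 10 ^ (PySem.Int.toChars r).length ≤ phi05 k := phi05_pow_le (by omega)
    have h2 : r.toNat < 10 ^ dlen r.toNat := lt_pow_dlen r.toNat
    rw [← hb] at h2
    omega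
  rcases (valset_prodRep05 (PySem.Int.toChars r).length ((phi05 k : Nat) : Int)).mpr ⟨k, hklt, rfl⟩
    with ⟨s, hs, hval⟩
  refine ⟨((PySem.Int.toChars r).length : Int), ?_, s, by simpa using hs, ⟨?_, ?_⟩, hval⟩
  · rw [PySem.List.mem_pyRange_one]
    exact ⟨by exact_mod_cast hab, by omega⟩
  · rw [hval]; exact hl
  · rw [hval]; exact hr

-- membership in A's answer set equals membership in B's list, outside D_
theorem mem_iff (l r : Int) (hdom : Dom_solution l r) (hND : ¬ D_solution l r) (x : Int) :
    (x ∈ (PySem.List.pyRange ((PySem.Int.toChars l).length : Int) (((PySem.Int.toChars r).length : Int) + 1) 1).foldl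
      (fun ans i =>
        (prodRep05 i.toNat).foldl
          (fun ans nums =>
            if l ≤ joinInt nums ∧ joinInt nums ≤ r then PySem.Set.add ans (joinInt nums) else ans)
          ans)
      PySem.Set.empty)
    ↔ (x ∈ (if l ≤ 0 ∧ 0 ≤ r then ([0] : List Int) else []) ++ go05 l r (phi05 1) []) := by
  rw [mem_outer_foldl, List.mem_append, mem_go05]
  have hempty : ¬ x ∈ (PySem.Set.empty : PySem.Set Int) := by
    simp [PySem.Set.empty]
  constructor
  · rintro (h | ⟨i, hi, s, hs, ⟨hxl, hxr⟩, rfl⟩)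
    · exact absurd h hempty
    · rcases (valset_prodRep05 i.toNat (joinInt s)).mp ⟨s, hs, rfl⟩ with ⟨k, hk, hphi⟩
      by_cases hk0 : k = 0
      · subst hk0
        rw [phi05_zero] at hphi
        left
        have hx0 : joinInt s = 0 := by exact_mod_cast hphi.symm
        rw [if_pos ⟨by omega, by omega⟩]
        simp [hx0]
      · right
        exact ⟨k, by omega, by rw [hphi]; exact hxl, by rw [hphi]; exact hxr, hphi.symm⟩
  · rintro (h | ⟨j, hj1, hjl, hjr, rfl⟩)
    · have hcase : l ≤ 0 ∧ 0 ≤ r ∧ x = 0 := by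
        by_cases hc : l ≤ 0 ∧ 0 ≤ r
        · rw [if_pos hc] at h
          exact ⟨hc.1, hc.2, by simpa using h⟩
        · rw [if_neg hc] at h
          simp at h
      rcases hcase with ⟨hl0, hr0, rfl⟩
      have h0 := build_mem l r hdom hND 0 (by rw [phi05_zero]; exact_mod_cast hl0)
        (by rw [phi05_zero]; exact_mod_cast hr0)
      rw [phi05_zero] at h0
      exact Or.inr (by exact_mod_cast h0)
    · exact Or.inr (build_mem l r hdom hND j hjl hjr)

-- B's list is strictly increasing
theorem pairwise_blist (l r : Int) :
    ((if l ≤ 0 ∧ 0 ≤ r then ([0] : List Int) else []) ++ go05 l r (phi05 1) []).Pairwise (· < ·) := by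
  apply List.pairwise_append.mpr
  refine ⟨?_, pairwise_go05 l r 1, ?_⟩
  · split <;> simp
  · intro a ha b hb
    rcases (mem_go05 l r 1 b).mp hb with ⟨j, hj, _, _, rfl⟩
    have h5 : 5 ≤ phi05 j := by
      have := phi05_mono hj
      rw [phi05_one] at this
      omega
    have ha0 : a = 0 := by
      by_cases hc : l ≤ 0 ∧ 0 ≤ r
      · rw [if_pos hc] at ha; simpa using ha
      · rw [if_neg hc] at ha; simp at ha
    subst ha0
    exact_mod_cast (by omega : (0:Nat) < phi05 j)

-- definitional unfoldings of the two ports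
theorem solution_eq (l r : Int) :
    solution l r =
      (if (PySem.List.sorted
          ((PySem.List.pyRange ((PySem.Int.toChars l).length : Int) (((PySem.Int.toChars r).length : Int) + 1) 1).foldl
            (fun ans i =>
              (prodRep05 i.toNat).foldl
                (fun ans nums =>
                  if l ≤ joinInt nums ∧ joinInt nums ≤ r then PySem.Set.add ans (joinInt nums) else ans)
                ans)
            PySem.Set.empty) (fun x => x) false).isEmpty
        then [-1]
        else PySem.List.sorted
          ((PySem.List.pyRange ((PySem.Int.toChars l).length : Int) (((PySem.Int.toChars r).length : Int) + 1) 1).foldl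
            (fun ans i =>
              (prodRep05 i.toNat).foldl
                (fun ans nums =>
                  if l ≤ joinInt nums ∧ joinInt nums ≤ r then PySem.Set.add ans (joinInt nums) else ans)
                ans)
            PySem.Set.empty) (fun x => x) false) := rfl

theorem solution_alt_eq (l r : Int) :
    solution_alt l r =
      (if (go05 l r 5 (if l ≤ 0 ∧ 0 ≤ r then [0] else [])).isEmpty
        then [-1]
        else go05 l r 5 (if l ≤ 0 ∧ 0 ≤ r then [0] else [])) := rfl

-- ===== VERDICT (by name: the statement is the Claim_ definition above) =====
theorem solution_spec : Claim_unchanged_solution := by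
  intro l r hdom hND
  show solution l r = solution_alt l r
  rw [solution_eq, solution_alt_eq]
  have h5 : (5 : Nat) = phi05 1 := phi05_one.symm
  rw [go05_append, h5]
  have hsorted :
      PySem.List.sorted
        ((PySem.List.pyRange ((PySem.Int.toChars l).length : Int) (((PySem.Int.toChars r).length : Int) + 1) 1).foldl
          (fun ans i =>
            (prodRep05 i.toNat).foldl
              (fun ans nums =>
                if l ≤ joinInt nums ∧ joinInt nums ≤ r then PySem.Set.add ans (joinInt nums) else ans)
              ans)
          PySem.Set.empty) (fun x => x) false
      = (if l ≤ 0 ∧ 0 ≤ r then ([0] : List Int) else []) ++ go05 l r (phi05 1) [] := by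
    apply PySem.List.sorted_eq_of_perm_of_pairwise_lt
    · apply (List.perm_ext_iff_of_nodup ?_ ?_).mpr
      · intro a
        exact (mem_iff l r hdom hND a).symm
      · exact (pairwise_blist l r).imp ne_of_lt
      · apply nodup_outer_foldl
        simp [PySem.Set.empty]
    · exact pairwise_blist l r
  rw [hsorted]

theorem solution_changed : Claim_changed_solution := by
  unfold Claim_changed_solution
  refine ⟨by decide, by decide, by decide, ?_, by decide⟩
  show solution_alt (-1) 0 = [0]
  rw [solution_alt_eq]
  rw [if_pos (by decide : (-1 : Int) ≤ 0 ∧ (0:Int) ≤ 0)]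
  have hgo : go05 (-1) 0 5 [0] = [0] := by
    rw [go05_eq]
    rw [if_neg (by decide)]
  rw [hgo]
  decide

theorem solution_tight : Claim_exact_solution := by
  intro l r _hdom hD
  rcases hD with ⟨hl0, hr0, d, _, hdl, hdr⟩
  have hba : (PySem.Int.toChars r).length < (PySem.Int.toChars l).length := by
    rw [toChars_length_neg hl0, toChars_length_of_nonneg hr0]
    have h1 : r.toNat < 10 ^ (d + 1) := by
      have : ((10:Nat) ^ (d+1) : Int) = (10:Int) ^ (d+1) := by push_cast; ring
      omega
    have h2 : dlen r.toNat ≤ d + 1 := dlen_le_of_lt_pow (by omega) h1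
    have h3 : (10:Nat) ^ d ≤ l.natAbs := by
      have : ((10:Nat) ^ d : Int) = (10:Int) ^ d := by push_cast; ring
      omega
    have h4 : d < dlen l.natAbs := by
      by_contra hge
      have h5 : (10:Nat) ^ dlen l.natAbs ≤ 10 ^ d := Nat.pow_le_pow_right (by norm_num) (by omega)
      have h6 := lt_pow_dlen l.natAbs
      omega
    omega
  have hA : solution l r = [-1] := by
    rw [solution_eq]
    rw [PySem.List.pyRange_one_eq_nil (by exact_mod_cast hba)]
    have hnil : PySem.List.sorted (PySem.Set.empty : PySem.Set Int) (fun x => x) false = [] := by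
      apply (PySem.List.sorted_eq_nil_iff _ _ _).mpr
      rfl
    simp only [List.foldl_nil, hnil]
    rfl
  have hinit : (if l ≤ 0 ∧ 0 ≤ r then ([0] : List Int) else []) = [0] :=
    if_pos ⟨le_of_lt hl0, hr0⟩
  have hB : solution_alt l r = 0 :: go05 l r 5 [] := by
    rw [solution_alt_eq, hinit, go05_append]
    simp
  rw [hA, hB]
  intro hcontra
  injection hcontra with h1 _
  exact absurd h1 (by norm_num)
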